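-- pv_equiv track=rewrite | github.com/mapproxy/mapproxy | mapproxy/source/metadata.py | _find_layer_by_name
-- ===== SOURCE A (Python) =====
-- def _find_layer_by_name(layers, layer_name):
--     """Find a single layer by name using multiple matching strategies."""
--     layer_name_lower = layer_name.lower()
--
--     # Try exact match first
--     for layer in layers:
--         if layer.get('name') == layer_name:
--             return layer
--
--     # Try case-insensitive match
--     for layer in layers:
--         if layer.get('name', '').lower() == layer_name_lower:
--             return layer
--
--     # Try partial match (contains)
--     for layer in layers:
--         if layer_name_lower in layer.get('name', '').lower():
--             return layer
--
--     return None
-- ===== SOURCE B (Python) =====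
-- def _find_layer_by_name(layers, layer_name):
--     """Single pass: return first exact match immediately; otherwise remember the
--     first case-insensitive and first substring matches and pick by priority."""
--     layer_name_lower = layer_name.lower()
--     first_ci = None
--     first_substring = None
--     for layer in layers:
--         if layer.get('name') == layer_name:
--             return layer
--         low = layer.get('name', '').lower()
--         if first_ci is None and low == layer_name_lower:
--             first_ci = layer
--         if first_substring is None and layer_name_lower in low:
--             first_substring = layer
--     if first_ci is not None:
--         return first_ci
--     return first_substring
-- ===== Notes on version B (the rewrite author's own statement) =====
-- stated objective: alternative
-- what changed: Replaced A's three sequential scans over layers by a single pass that returns the first exact match immediately and tracks the first case-insensitive and first substring candidates in two variables.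
import Mathlib
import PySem

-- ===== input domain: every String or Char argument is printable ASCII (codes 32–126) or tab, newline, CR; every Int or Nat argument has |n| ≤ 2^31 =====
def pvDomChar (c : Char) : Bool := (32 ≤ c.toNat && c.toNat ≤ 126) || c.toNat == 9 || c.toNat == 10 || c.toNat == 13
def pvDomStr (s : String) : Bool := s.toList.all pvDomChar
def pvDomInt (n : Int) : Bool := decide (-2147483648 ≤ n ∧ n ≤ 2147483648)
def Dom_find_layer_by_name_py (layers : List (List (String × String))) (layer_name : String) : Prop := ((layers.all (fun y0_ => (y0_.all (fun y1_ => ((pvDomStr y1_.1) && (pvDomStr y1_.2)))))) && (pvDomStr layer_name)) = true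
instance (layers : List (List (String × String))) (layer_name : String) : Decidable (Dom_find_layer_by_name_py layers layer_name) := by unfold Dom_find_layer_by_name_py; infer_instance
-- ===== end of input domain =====

-- B replaces A's three sequential scans by a single pass with two candidate variables (objective: alternative decomposition).

-- ===== PORT A =====
-- first loop: exact match on layer.get('name') (None for a missing key never equals a string)
def pvLoopExact (layers : List (List (String × String))) (layer_name : String) :
    Option (List (String × String)) :=
  match layers with
  | [] => none
  | layer :: rest =>
      if PySem.Dict.get? (PySem.Dict.mk layer) "name" == some layer_name then some layer
      else pvLoopExact rest layer_name

-- second loop: case-insensitive match on layer.get('name', '').lower()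
def pvLoopCI (layers : List (List (String × String))) (layer_name_lower : String) :
    Option (List (String × String)) :=
  match layers with
  | [] => none
  | layer :: rest =>
      if PySem.Str.lower (PySem.Dict.getD (PySem.Dict.mk layer) "name" "") == layer_name_lower then some layer
      else pvLoopCI rest layer_name_lower

-- third loop: substring match, layer_name_lower in layer.get('name', '').lower()
def pvLoopSub (layers : List (List (String × String))) (layer_name_lower : String) :
    Option (List (String × String)) :=
  match layers with
  | [] => none
  | layer :: rest =>
      if PySem.Str.isIn layer_name_lower (PySem.Str.lower (PySem.Dict.getD (PySem.Dict.mk layer) "name" "")) then some layer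
      else pvLoopSub rest layer_name_lower

def find_layer_by_name_py (layers : List (List (String × String))) (layer_name : String) :
    Option (List (String × String)) :=
  let layer_name_lower := PySem.Str.lower layer_name
  match pvLoopExact layers layer_name with
  | some layer => some layer
  | none =>
    match pvLoopCI layers layer_name_lower with
    | some layer => some layer
    | none =>
      match pvLoopSub layers layer_name_lower with
      | some layer => some layer
      | none => none

-- ===== PORT B =====
-- single pass: early return on exact match, accumulators for the first ci / substring candidates
def pvAltGo (layers : List (List (String × String))) (layer_name layer_name_lower : String)
    (first_ci first_substring : Option (List (String × String))) :
    Option (List (String × String)) :=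
  match layers with
  | [] =>
      match first_ci with
      | some l => some l
      | none => first_substring
  | layer :: rest =>
      if PySem.Dict.get? (PySem.Dict.mk layer) "name" == some layer_name then some layer
      else
        let low := PySem.Str.lower (PySem.Dict.getD (PySem.Dict.mk layer) "name" "")
        let first_ci' := if first_ci.isNone && (low == layer_name_lower) then some layer else first_ci
        let first_substring' :=
          if first_substring.isNone && PySem.Str.isIn layer_name_lower low then some layer
          else first_substring
        pvAltGo rest layer_name layer_name_lower first_ci' first_substring'

def find_layer_by_name_py_alt (layers : List (List (String × String))) (layer_name : String) :
    Option (List (String × String)) :=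
  pvAltGo layers layer_name (PySem.Str.lower layer_name) none none

-- ===== PRECONDITION & SPEC =====
def Spec_find_layer_by_name_py (layers : List (List (String × String))) (layer_name : String) (out : Option (List (String × String))) : Prop := out = find_layer_by_name_py_alt layers layer_name
instance (layers : List (List (String × String))) (layer_name : String) (out : Option (List (String × String))) : Decidable (Spec_find_layer_by_name_py layers layer_name out) := by unfold Spec_find_layer_by_name_py; infer_instance

-- ===== CLAIM (what is proved, stated in full; the proofs are below) =====
def Claim_equal_find_layer_by_name_py : Prop := ∀ (layers : List (List (String × String))) (layer_name : String), Dom_find_layer_by_name_py layers layer_name → Spec_find_layer_by_name_py layers layer_name (find_layer_by_name_py layers layer_name)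

-- ===== LEMMAS AND PROOFS =====

-- Characterisation of B's loop: with accumulators ci/sub it computes A's cascade, where the
-- accumulators take priority over later ci/substring hits but an exact hit beats both.
theorem pvAltGo_eq (layers : List (List (String × String))) (layer_name : String)
    (ci sub : Option (List (String × String))) :
    pvAltGo layers layer_name (PySem.Str.lower layer_name) ci sub =
      match pvLoopExact layers layer_name with
      | some l => some l
      | none =>
        match ci.or (pvLoopCI layers (PySem.Str.lower layer_name)) with
        | some l => some l
        | none => sub.or (pvLoopSub layers (PySem.Str.lower layer_name)) := by
  induction layers generalizing ci sub with
  | nil =>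
      cases ci <;> cases sub <;> simp [pvAltGo, pvLoopExact, pvLoopCI, pvLoopSub, Option.or]
  | cons layer rest ih =>
      simp only [pvAltGo, pvLoopExact, pvLoopCI, pvLoopSub]
      by_cases hx : PySem.Dict.get? (PySem.Dict.mk layer) "name" == some layer_name
      · simp [hx]
      · simp only [hx, if_false]
        rw [ih]
        by_cases hci : PySem.Str.lower (PySem.Dict.getD (PySem.Dict.mk layer) "name" "") == PySem.Str.lower layer_name <;>
        by_cases hsub : PySem.Str.isIn (PySem.Str.lower layer_name)
            (PySem.Str.lower (PySem.Dict.getD (PySem.Dict.mk layer) "name" "")) <;>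
        cases ci <;> cases sub <;>
          simp only [hci, hsub, if_true, if_false, Option.isNone, Bool.true_and,
            Bool.false_and, Bool.and_true, Bool.and_false, ite_true, ite_false, Option.or] <;>
          cases pvLoopExact rest layer_name <;>
          cases pvLoopCI rest (PySem.Str.lower layer_name) <;>
          cases pvLoopSub rest (PySem.Str.lower layer_name) <;>
          simp [hci, hsub, Option.or]

-- ===== VERDICT (by name: the statement is the Claim_ definition above) =====
theorem find_layer_by_name_py_spec : Claim_equal_find_layer_by_name_py := by
  intro layers layer_name _
  show find_layer_by_name_py layers layer_name = find_layer_by_name_py_alt layers layer_name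
  unfold find_layer_by_name_py find_layer_by_name_py_alt
  rw [pvAltGo_eq]
  cases pvLoopExact layers layer_name <;>
    simp [Option.or] <;>
    cases pvLoopCI layers (PySem.Str.lower layer_name) <;>
    cases pvLoopSub layers (PySem.Str.lower layer_name) <;>
    simp
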